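-- pv_equiv track=rewrite | github.com/shirkirtia-art/web-cache-vuln-tool | cache_scanner.py | detect_cdn
-- ===== SOURCE A (Python) =====
-- def detect_cdn(headers):
--     lower_headers = {k.lower(): v.lower() for k, v in headers.items()}
--     if 'cf-ray' in lower_headers or 'cf-cache-status' in lower_headers:
--         return 'Cloudflare'
--     if 'x-amz-cf-id' in lower_headers or ('server' in lower_headers and 'cloudfront' in lower_headers['server']):
--         return 'CloudFront'
--     if 'fastly-cache' in lower_headers or ('x-served-by' in lower_headers and 'fastly' in lower_headers['x-served-by']):
--         return 'Fastly'
--     if 'x-akamai-cache-status' in lower_headers or ('via' in lower_headers and 'akamai' in lower_headers['via']):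
--         return 'Akamai'
--     if ('via' in lower_headers and 'varnish' in lower_headers['via']) or 'x-varnish' in lower_headers:
--         return 'Varnish'
--     return 'Unknown'
-- ===== SOURCE B (Python) =====
-- # Inverted loop: one pass over the headers, each header is mapped to the
-- # smallest rule index it triggers; the answer is the minimum index seen.
-- _NAMES = ('Cloudflare', 'CloudFront', 'Fastly', 'Akamai', 'Varnish', 'Unknown')
--
-- def _rule_index(k, v):
--     if k == 'cf-ray' or k == 'cf-cache-status':
--         return 0
--     if k == 'x-amz-cf-id' or (k == 'server' and 'cloudfront' in v):
--         return 1
--     if k == 'fastly-cache' or (k == 'x-served-by' and 'fastly' in v):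
--         return 2
--     if k == 'x-akamai-cache-status' or (k == 'via' and 'akamai' in v):
--         return 3
--     if k == 'x-varnish' or (k == 'via' and 'varnish' in v):
--         return 4
--     return 5
--
-- def detect_cdn(headers):
--     lower_headers = {k.lower(): v.lower() for k, v in headers.items()}
--     best = 5
--     for k, v in lower_headers.items():
--         best = min(best, _rule_index(k, v))
--     return _NAMES[best]
-- ===== Notes on version B (the rewrite author's own statement) =====
-- stated objective: alternative
-- what changed: Inverts the traversal: instead of testing the five rules in order against the header dict, B makes a single pass over the headers, maps each header to the smallest rule index it triggers, and returns the name of the minimum index (min-reduction over headers instead of first-match over rules).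
import Mathlib
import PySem

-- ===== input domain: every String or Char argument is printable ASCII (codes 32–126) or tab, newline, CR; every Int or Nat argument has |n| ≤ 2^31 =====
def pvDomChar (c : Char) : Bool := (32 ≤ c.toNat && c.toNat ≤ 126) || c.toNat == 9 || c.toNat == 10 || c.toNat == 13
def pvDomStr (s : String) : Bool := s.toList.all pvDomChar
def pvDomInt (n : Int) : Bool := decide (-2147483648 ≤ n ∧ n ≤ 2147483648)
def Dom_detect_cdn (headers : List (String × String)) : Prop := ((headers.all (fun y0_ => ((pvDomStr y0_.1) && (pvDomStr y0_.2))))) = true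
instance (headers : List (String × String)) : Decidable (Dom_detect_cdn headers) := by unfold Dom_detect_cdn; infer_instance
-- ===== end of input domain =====

-- B inverts the traversal: one pass over the header dict taking the minimum rule
-- index each header triggers, instead of A's ordered if-chain of rule tests; alternative, same cost.


-- ===== PORT A =====
-- lower_headers = {k.lower(): v.lower() for k, v in headers.items()}
def pvLowerDict (headers : List (String × String)) : PySem.Dict String String :=
  headers.foldl (fun d p => d.insert (PySem.Str.lower p.1) (PySem.Str.lower p.2)) PySem.Dict.empty

-- 'h in lower_headers and sub in lower_headers[h]'
def pvSubIn (d : PySem.Dict String String) (h sub : String) : Bool :=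
  d.contains h &&
    (match d.get? h with
     | some v => PySem.Str.isIn sub v
     | none => false)

def detect_cdn (headers : List (String × String)) : String :=
  let lh := pvLowerDict headers
  if lh.contains "cf-ray" || lh.contains "cf-cache-status" then "Cloudflare"
  else if lh.contains "x-amz-cf-id" || pvSubIn lh "server" "cloudfront" then "CloudFront"
  else if lh.contains "fastly-cache" || pvSubIn lh "x-served-by" "fastly" then "Fastly"
  else if lh.contains "x-akamai-cache-status" || pvSubIn lh "via" "akamai" then "Akamai"
  else if pvSubIn lh "via" "varnish" || lh.contains "x-varnish" then "Varnish"
  else "Unknown"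

-- ===== PORT B =====
def pvNames : List String :=
  ["Cloudflare", "CloudFront", "Fastly", "Akamai", "Varnish", "Unknown"]

-- _rule_index(k, v): smallest rule index the header (k, v) triggers, 5 if none
def pvRuleIdx (k v : String) : Nat :=
  if k == "cf-ray" || k == "cf-cache-status" then 0
  else if k == "x-amz-cf-id" || (k == "server" && PySem.Str.isIn "cloudfront" v) then 1
  else if k == "fastly-cache" || (k == "x-served-by" && PySem.Str.isIn "fastly" v) then 2
  else if k == "x-akamai-cache-status" || (k == "via" && PySem.Str.isIn "akamai" v) then 3
  else if k == "x-varnish" || (k == "via" && PySem.Str.isIn "varnish" v) then 4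
  else 5

def detect_cdn_alt (headers : List (String × String)) : String :=
  let lh := pvLowerDict headers
  let best := lh.items.foldl (fun b p => min b (pvRuleIdx p.1 p.2)) 5
  -- _NAMES[best]: best is always in range 0..5, so Python never raises here
  (PySem.List.pyGet? pvNames (best : Int)).getD "Unknown"

-- ===== PRECONDITION & SPEC =====
def Spec_detect_cdn (headers : List (String × String)) (out : String) : Prop := out = detect_cdn_alt headers
instance (headers : List (String × String)) (out : String) : Decidable (Spec_detect_cdn headers out) := by unfold Spec_detect_cdn; infer_instance

-- ===== CLAIM (what is proved, stated in full; the proofs are below) =====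
def Claim_equal_detect_cdn : Prop := ∀ (headers : List (String × String)), Dom_detect_cdn headers → Spec_detect_cdn headers (detect_cdn headers)

-- ===== LEMMAS AND PROOFS =====

theorem pvLowerDict_nodup (headers : List (String × String)) : (pvLowerDict headers).keys.Nodup := by
  exact PySem.Dict.nodup_keys_foldl_insert_key headers (fun p => PySem.Str.lower p.1)
    (fun d p => PySem.Str.lower p.2) PySem.Dict.empty PySem.Dict.nodup_keys_empty

-- d.contains h ↔ some item has key h
theorem contains_iff_ex (d : PySem.Dict String String) (h : String) :
    d.contains h = true ↔ ∃ p ∈ d.items, p.1 = h := by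
  rw [PySem.Dict.contains_iff_mem_keys]
  simp [PySem.Dict.keys, List.mem_map]


-- pvSubIn ↔ some item has key h and value containing sub (needs nodup keys)
theorem subIn_iff_ex (d : PySem.Dict String String) (hnd : d.keys.Nodup) (h sub : String) :
    pvSubIn d h sub = true ↔ ∃ p ∈ d.items, p.1 = h ∧ PySem.Str.isIn sub p.2 = true := by
  unfold pvSubIn
  constructor
  · intro hx
    rw [Bool.and_eq_true] at hx
    obtain ⟨hc, hv⟩ := hx
    cases hg : d.get? h with
    | none => rw [hg] at hv; simp at hv
    | some v =>
      rw [hg] at hv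
      exact ⟨(h, v), PySem.Dict.mem_items_of_get?_eq_some _ hg, rfl, hv⟩
  · rintro ⟨⟨k, v⟩, hm, rfl, hs⟩
    have hg : d.get? k = some v := PySem.Dict.get?_of_mem_items _ hm hnd
    rw [Bool.and_eq_true, PySem.Dict.contains_eq_isSome_get?, hg]
    exact ⟨rfl, hs⟩

-- characterization of the min-fold: its value is ≤ j iff the seed is or some element maps ≤ j
theorem foldl_min_le_iff (l : List (String × String)) (a j : Nat) :
    l.foldl (fun b p => min b (pvRuleIdx p.1 p.2)) a ≤ j ↔
      a ≤ j ∨ ∃ p ∈ l, pvRuleIdx p.1 p.2 ≤ j := by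
  induction l generalizing a with
  | nil => simp
  | cons q t ih =>
    simp only [List.foldl_cons, ih, List.mem_cons]
    constructor
    · rintro (hm | ⟨p, hp, hle⟩)
      · rcases min_le_iff.mp hm with h' | h'
        · exact Or.inl h'
        · exact Or.inr ⟨q, Or.inl rfl, h'⟩
      · exact Or.inr ⟨p, Or.inr hp, hle⟩
    · rintro (ha | ⟨p, hp | hp, hle⟩)
      · exact Or.inl (le_trans (Nat.min_le_left _ _) ha)
      · exact Or.inl (le_trans (Nat.min_le_right _ _) (hp ▸ hle))
      · exact Or.inr ⟨p, hp, hle⟩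

-- pvRuleIdx p ≤ j unfolds to the disjunction of the first j+1 trigger conditions
theorem ruleIdx_le_iff (k v : String) (j : Nat) (hj : j ≤ 4) :
    pvRuleIdx k v ≤ j ↔
      (j ≥ 0 ∧ (k == "cf-ray" || k == "cf-cache-status") = true) ∨
      (j ≥ 1 ∧ (k == "x-amz-cf-id" || (k == "server" && PySem.Str.isIn "cloudfront" v)) = true) ∨
      (j ≥ 2 ∧ (k == "fastly-cache" || (k == "x-served-by" && PySem.Str.isIn "fastly" v)) = true) ∨
      (j ≥ 3 ∧ (k == "x-akamai-cache-status" || (k == "via" && PySem.Str.isIn "akamai" v)) = true) ∨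
      (j ≥ 4 ∧ (k == "x-varnish" || (k == "via" && PySem.Str.isIn "varnish" v)) = true) := by
  unfold pvRuleIdx
  split_ifs with h0 h1 h2 h3 h4 <;> simp_all
  · rintro (⟨h,_⟩|⟨h,_⟩|⟨h,_⟩) <;> omega
  · rcases h2 with rfl | ⟨rfl, _⟩ <;> simp_all
  · rcases h3 with rfl | ⟨rfl, _⟩ <;> simp_all
    intro h _; omega
  · rcases h4 with rfl | ⟨rfl, _⟩ <;> simp_all
  · constructor
    · intro h; omega
    · rintro (⟨_, rfl, hv⟩ | ⟨_, rfl, hv⟩ | ⟨_, rfl, hv⟩ | ⟨_, rfl, hv⟩) <;> simp_all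

-- the existential over items at level j translates to A's dict conditions
theorem ex_le_iff (d : PySem.Dict String String) (hnd : d.keys.Nodup) (j : Nat) (hj : j ≤ 4) :
    (∃ p ∈ d.items, pvRuleIdx p.1 p.2 ≤ j) ↔
      ((d.contains "cf-ray" || d.contains "cf-cache-status") = true) ∨
      (1 ≤ j ∧ (d.contains "x-amz-cf-id" || pvSubIn d "server" "cloudfront") = true) ∨
      (2 ≤ j ∧ (d.contains "fastly-cache" || pvSubIn d "x-served-by" "fastly") = true) ∨
      (3 ≤ j ∧ (d.contains "x-akamai-cache-status" || pvSubIn d "via" "akamai") = true) ∨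
      (4 ≤ j ∧ (pvSubIn d "via" "varnish" || d.contains "x-varnish") = true) := by
  have hc := contains_iff_ex d
  have hs := subIn_iff_ex d hnd
  simp only [ruleIdx_le_iff _ _ j hj, Bool.or_eq_true, Bool.and_eq_true, beq_iff_eq, hc, hs]
  constructor
  · rintro ⟨p, hp, ⟨_, (hk | hk)⟩ | ⟨h1, (hk | ⟨hk, hv⟩)⟩ | ⟨h2, (hk | ⟨hk, hv⟩)⟩ |
      ⟨h3, (hk | ⟨hk, hv⟩)⟩ | ⟨h4, (hk | ⟨hk, hv⟩)⟩⟩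
    · exact Or.inl (Or.inl ⟨p, hp, hk⟩)
    · exact Or.inl (Or.inr ⟨p, hp, hk⟩)
    · exact Or.inr (Or.inl ⟨h1, Or.inl ⟨p, hp, hk⟩⟩)
    · exact Or.inr (Or.inl ⟨h1, Or.inr ⟨p, hp, hk, hv⟩⟩)
    · exact Or.inr (Or.inr (Or.inl ⟨h2, Or.inl ⟨p, hp, hk⟩⟩))
    · exact Or.inr (Or.inr (Or.inl ⟨h2, Or.inr ⟨p, hp, hk, hv⟩⟩))
    · exact Or.inr (Or.inr (Or.inr (Or.inl ⟨h3, Or.inl ⟨p, hp, hk⟩⟩)))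
    · exact Or.inr (Or.inr (Or.inr (Or.inl ⟨h3, Or.inr ⟨p, hp, hk, hv⟩⟩)))
    · exact Or.inr (Or.inr (Or.inr (Or.inr ⟨h4, Or.inr ⟨p, hp, hk⟩⟩)))
    · exact Or.inr (Or.inr (Or.inr (Or.inr ⟨h4, Or.inl ⟨p, hp, hk, hv⟩⟩)))
  · rintro ((⟨p, hp, hk⟩ | ⟨p, hp, hk⟩) | ⟨h1, ⟨p, hp, hk⟩ | ⟨p, hp, hk, hv⟩⟩ |
      ⟨h2, ⟨p, hp, hk⟩ | ⟨p, hp, hk, hv⟩⟩ | ⟨h3, ⟨p, hp, hk⟩ | ⟨p, hp, hk, hv⟩⟩ |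
      ⟨h4, ⟨p, hp, hk, hv⟩ | ⟨p, hp, hk⟩⟩)
    · exact ⟨p, hp, Or.inl ⟨Nat.zero_le _, Or.inl hk⟩⟩
    · exact ⟨p, hp, Or.inl ⟨Nat.zero_le _, Or.inr hk⟩⟩
    · exact ⟨p, hp, Or.inr (Or.inl ⟨h1, Or.inl hk⟩)⟩
    · exact ⟨p, hp, Or.inr (Or.inl ⟨h1, Or.inr ⟨hk, hv⟩⟩)⟩
    · exact ⟨p, hp, Or.inr (Or.inr (Or.inl ⟨h2, Or.inl hk⟩))⟩
    · exact ⟨p, hp, Or.inr (Or.inr (Or.inl ⟨h2, Or.inr ⟨hk, hv⟩⟩))⟩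
    · exact ⟨p, hp, Or.inr (Or.inr (Or.inr (Or.inl ⟨h3, Or.inl hk⟩)))⟩
    · exact ⟨p, hp, Or.inr (Or.inr (Or.inr (Or.inl ⟨h3, Or.inr ⟨hk, hv⟩⟩)))⟩
    · exact ⟨p, hp, Or.inr (Or.inr (Or.inr (Or.inr ⟨h4, Or.inr ⟨hk, hv⟩⟩)))⟩
    · exact ⟨p, hp, Or.inr (Or.inr (Or.inr (Or.inr ⟨h4, Or.inl hk⟩)))⟩

-- ===== VERDICT (by name: the statement is the Claim_ definition above) =====
theorem detect_cdn_spec : Claim_equal_detect_cdn := by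
  intro headers _
  unfold Spec_detect_cdn detect_cdn detect_cdn_alt
  dsimp only
  have hnd := pvLowerDict_nodup headers
  set d := pvLowerDict headers with hd
  set m := d.items.foldl (fun b p => min b (pvRuleIdx p.1 p.2)) 5 with hmdef
  have key : ∀ j : Nat, j ≤ 4 → (m ≤ j ↔ ∃ p ∈ d.items, pvRuleIdx p.1 p.2 ≤ j) := by
    intro j hj
    rw [hmdef, foldl_min_le_iff]
    constructor
    · rintro (h | h)
      · omega
      · exact h
    · exact Or.inr
  have hm5 : m ≤ 5 := by rw [hmdef, foldl_min_le_iff]; exact Or.inl (le_refl 5)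
  have e : ∀ j : Nat, ∀ hj : j ≤ 4, (m ≤ j ↔ _) := fun j hj => (key j hj).trans (ex_le_iff d hnd j hj)
  have e0 := e 0 (by omega)
  have e1 := e 1 (by omega)
  have e2 := e 2 (by omega)
  have e3 := e 3 (by omega)
  have e4 := e 4 (by omega)
  norm_num at e0 e1 e2 e3 e4
  by_cases c0 : d.contains "cf-ray" = true ∨ d.contains "cf-cache-status" = true
  · rw [if_pos ((Bool.or_eq_true _ _).mpr c0), e0.mpr c0]; rfl
  · have n0 : ¬ m = 0 := fun h => c0 (e0.mp h)
    rw [if_neg (fun h => c0 ((Bool.or_eq_true _ _).mp h))]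
    by_cases c1 : d.contains "x-amz-cf-id" = true ∨ pvSubIn d "server" "cloudfront" = true
    · have hle : m ≤ 1 := e1.mpr (Or.inr c1)
      have hm : m = 1 := by omega
      rw [if_pos ((Bool.or_eq_true _ _).mpr c1), hm]; rfl
    · have n1 : ¬ m ≤ 1 := fun h => (e1.mp h).elim c0 c1
      rw [if_neg (fun h => c1 ((Bool.or_eq_true _ _).mp h))]
      by_cases c2 : d.contains "fastly-cache" = true ∨ pvSubIn d "x-served-by" "fastly" = true
      · have hle : m ≤ 2 := e2.mpr (Or.inr (Or.inr c2))
        have hm : m = 2 := by omega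
        rw [if_pos ((Bool.or_eq_true _ _).mpr c2), hm]; rfl
      · have n2 : ¬ m ≤ 2 := fun h => (e2.mp h).elim c0 (fun h' => h'.elim c1 c2)
        rw [if_neg (fun h => c2 ((Bool.or_eq_true _ _).mp h))]
        by_cases c3 : d.contains "x-akamai-cache-status" = true ∨ pvSubIn d "via" "akamai" = true
        · have hle : m ≤ 3 := e3.mpr (Or.inr (Or.inr (Or.inr c3)))
          have hm : m = 3 := by omega
          rw [if_pos ((Bool.or_eq_true _ _).mpr c3), hm]; rfl
        · have n3 : ¬ m ≤ 3 := fun h =>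
            (e3.mp h).elim c0 (fun h' => h'.elim c1 (fun h'' => h''.elim c2 c3))
          rw [if_neg (fun h => c3 ((Bool.or_eq_true _ _).mp h))]
          by_cases c4 : pvSubIn d "via" "varnish" = true ∨ d.contains "x-varnish" = true
          · have hle : m ≤ 4 := e4.mpr (Or.inr (Or.inr (Or.inr (Or.inr c4))))
            have hm : m = 4 := by omega
            rw [if_pos ((Bool.or_eq_true _ _).mpr c4), hm]; rfl
          · have n4 : ¬ m ≤ 4 := fun h =>
              (e4.mp h).elim c0 (fun h' => h'.elim c1 (fun h'' => h''.elim c2 (fun h3' => h3'.elim c3 c4)))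
            have hm : m = 5 := by omega
            rw [if_neg (fun h => c4 ((Bool.or_eq_true _ _).mp h)), hm]; rfl
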